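-- pv_equiv track=rewrite | github.com/deduu/vidavox | vidavox/retriever/search_manager.py | merge_batches
-- ===== SOURCE A (Python) =====
-- from typing import List, Dict, Any, Optional, Tuple, Set
--
-- def merge_batches(batches: List[List[Dict]]) -> List[Dict]:
--     """Merge and deduplicate batch results, keeping best score per document."""
--     best: Dict[str, Dict] = {}
--
--     for batch in batches:  # outer list == per-query list
--         for item in batch:  # inner list == individual hits
--             doc_id = item.get("id")
--             score = item.get("score", 0)
--             if doc_id is None:
--                 continue
--
--             # Keep item only if first time seeing ID or better score
--             current_best = best.get(doc_id)
--             if current_best is None or score > current_best["score"]: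
--                 best[doc_id] = item
--
--     # Convert dict to list and sort by score (descending)
--     return sorted(best.values(), key=lambda x: x["score"], reverse=True)
-- ===== SOURCE B (Python) =====
-- def merge_batches(batches):
--     """Merge and deduplicate batch results, keeping best score per document."""
--     # One pass: group every hit by its id (skip hits without an id).
--     groups = {}
--     for batch in batches:
--         for item in batch:
--             doc_id = item.get("id")
--             if doc_id is None:
--                 continue
--             groups.setdefault(doc_id, []).append(item)
--     # Per group, the survivor is the first hit with maximal score (max keeps the
--     # first maximum, which matches A's strict-improvement replacement rule).
--     survivors = [max(group, key=lambda x: x.get("score", 0)) for group in groups.values()]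
--     return sorted(survivors, key=lambda x: x.get("score", 0), reverse=True)
-- ===== Notes on version B (the rewrite author's own statement) =====
-- stated objective: alternative
-- what changed: B accumulates all hits per id in a first pass and then picks each group's survivor with max (first maximum, matching A's strict-improvement rule), instead of maintaining a running best dict during the scan.
import Mathlib
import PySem

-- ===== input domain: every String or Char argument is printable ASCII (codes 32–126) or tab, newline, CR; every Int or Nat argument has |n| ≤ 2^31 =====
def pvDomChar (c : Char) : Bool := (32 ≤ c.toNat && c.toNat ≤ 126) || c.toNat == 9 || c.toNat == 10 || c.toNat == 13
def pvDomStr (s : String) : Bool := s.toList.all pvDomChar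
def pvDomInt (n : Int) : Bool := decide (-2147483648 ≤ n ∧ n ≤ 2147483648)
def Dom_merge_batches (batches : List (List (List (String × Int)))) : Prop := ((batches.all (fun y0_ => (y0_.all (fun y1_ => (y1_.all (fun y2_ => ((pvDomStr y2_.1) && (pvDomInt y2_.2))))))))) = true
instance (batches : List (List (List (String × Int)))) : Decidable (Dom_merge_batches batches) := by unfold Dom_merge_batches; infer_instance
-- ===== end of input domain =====

-- B groups all hits per id first and then picks each group's first-maximal hit with max,
-- instead of A's running-best dict; same result, proved equal on Pre_ (alternative decomposition).


-- ===== PORT A =====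
-- inner loop body of A: doc_id = item.get("id"); score = item.get("score", 0); …
def pvAStep (best : PySem.Dict Int (List (String × Int))) (item : List (String × Int)) :
    PySem.Dict Int (List (String × Int)) :=
  let docId := (PySem.Dict.mk item).get? "id"
  let score := (PySem.Dict.mk item).getD "score" 0
  match docId with
  | none => best
  | some i =>
    match best.get? i with
    | none => best.insert i item
    | some cur =>
      -- Python's current_best["score"] raises KeyError when "score" is absent;
      -- Pre_ guarantees presence, so getD 0 is exact there
      if score > (PySem.Dict.mk cur).getD "score" 0 then best.insert i item else best

def merge_batches (batches : List (List (List (String × Int)))) : List (List (String × Int)) :=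
  let best := batches.foldl (fun b batch => batch.foldl pvAStep b)
    (PySem.Dict.empty : PySem.Dict Int (List (String × Int)))
  -- Python's sort key x["score"] raises KeyError when absent; Pre_ guarantees presence
  PySem.List.sorted best.values (fun x => (PySem.Dict.mk x).getD "score" 0) true

-- ===== PORT B =====
-- inner loop body of B: groups.setdefault(doc_id, []).append(item)
def pvBStep (groups : PySem.Dict Int (List (List (String × Int)))) (item : List (String × Int)) :
    PySem.Dict Int (List (List (String × Int))) :=
  match (PySem.Dict.mk item).get? "id" with
  | none => groups
  | some i => groups.modify i [] (fun grp => grp ++ [item])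

def merge_batches_alt (batches : List (List (List (String × Int)))) : List (List (String × Int)) :=
  let groups := batches.foldl (fun g batch => batch.foldl pvBStep g)
    (PySem.Dict.empty : PySem.Dict Int (List (List (String × Int))))
  let survivors := groups.values.map
    (fun grp => PySem.List.maxD grp (fun x => (PySem.Dict.mk x).getD "score" 0) [])
  PySem.List.sorted survivors (fun x => (PySem.Dict.mk x).getD "score" 0) true

-- ===== PRECONDITION & SPEC =====
-- Pre_ excludes batches containing a hit that has an "id" key but no "score" key: on such inputs
-- Python A usually raises KeyError (at current_best["score"] or at the sort key); on the few of
-- them where A still returns (the scoreless hit is never stored in best), B returns the same value.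
def Pre_merge_batches (batches : List (List (List (String × Int)))) : Prop :=
  (batches.all (fun batch => batch.all (fun item =>
    !(PySem.Dict.mk item).contains "id" || (PySem.Dict.mk item).contains "score"))) = true
instance (batches : List (List (List (String × Int)))) : Decidable (Pre_merge_batches batches) := by
  unfold Pre_merge_batches; infer_instance

def pvWitness_merge_batches : (List (List (List (String × Int)))) :=
  [[[("id", 1), ("score", 5)], [("x", 2)]], [[("id", 1), ("score", 7)]]]

def Spec_merge_batches (batches : List (List (List (String × Int)))) (out : List (List (String × Int))) : Prop := out = merge_batches_alt batches
instance (batches : List (List (List (String × Int)))) (out : List (List (String × Int))) : Decidable (Spec_merge_batches batches out) := by unfold Spec_merge_batches; infer_instance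

-- ===== CLAIM (what is proved, stated in full; the proofs are below) =====
def Claim_equal_merge_batches : Prop := ∀ (batches : List (List (List (String × Int)))), Dom_merge_batches batches → Pre_merge_batches batches → Spec_merge_batches batches (merge_batches batches)

-- ===== LEMMAS AND PROOFS =====

-- the shared score key function
def pvKf (x : List (String × Int)) : Int := (PySem.Dict.mk x).getD "score" 0

-- the per-entry survivor map
def pvF (p : Int × List (List (String × Int))) : Int × List (String × Int) :=
  (p.1, PySem.List.maxD p.2 pvKf [])

-- invariant relating A's running-best dict to B's groups dict
def pvInv (best : PySem.Dict Int (List (String × Int))) (groups : PySem.Dict Int (List (List (String × Int)))) : Prop :=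
  groups.keys.Nodup ∧ (∀ p ∈ groups.items, p.2 ≠ []) ∧ best.items = groups.items.map pvF

lemma pv_max?_isSome {α : Type} (kf : α → Int) (g : List α) (hg : g ≠ []) :
    (PySem.List.max? g kf).isSome := by
  cases g with
  | nil => exact absurd rfl hg
  | cons a t =>
    have aux : ∀ (t : List α) (acc : Option α), acc.isSome →
        (t.foldl (fun acc x => match acc with
          | none => some x
          | some m => if kf m < kf x then some x else some m) acc).isSome := by
      intro t
      induction t with
      | nil => intro acc h; exact h
      | cons x t ih =>
        intro acc h
        cases acc with
        | none => simp at h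
        | some m =>
          simp only [List.foldl_cons]
          apply ih
          by_cases h' : kf m < kf x <;> simp [h']
    exact aux t (some a) rfl

lemma pv_max?_append_singleton {α : Type} (kf : α → Int) (g : List α) (x : α) :
    PySem.List.max? (g ++ [x]) kf =
      some (match PySem.List.max? g kf with
            | none => x
            | some m => if kf m < kf x then x else m) := by
  have hstep : ∀ r : Option α,
      List.foldl (fun acc y => match acc with
        | none => some y
        | some m => if kf m < kf y then some y else some m) r [x] =
      some (match r with
            | none => x
            | some m => if kf m < kf x then x else m) := by
    intro r
    cases r with
    | none => rfl
    | some m =>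
      simp only [List.foldl_cons, List.foldl_nil]
      by_cases h' : kf m < kf x <;> simp [h']
  calc PySem.List.max? (g ++ [x]) kf
      = List.foldl (fun acc y => match acc with
          | none => some y
          | some m => if kf m < kf y then some y else some m)
          (PySem.List.max? g kf) [x] := by
        simp only [PySem.List.max?, List.foldl_append]; rfl
    _ = _ := hstep _

lemma pv_keys_of_inv (best : PySem.Dict Int (List (String × Int)))
    (groups : PySem.Dict Int (List (List (String × Int))))
    (h : pvInv best groups) : best.keys = groups.keys := by
  obtain ⟨-, -, hitems⟩ := h
  simp [PySem.Dict.keys, hitems, List.map_map, pvF, Function.comp]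

lemma pv_get?_of_inv (best : PySem.Dict Int (List (String × Int)))
    (groups : PySem.Dict Int (List (List (String × Int))))
    (h : pvInv best groups) (i : Int) :
    best.get? i = (groups.get? i).map (fun g => PySem.List.maxD g pvKf []) := by
  have hkeys := pv_keys_of_inv best groups h
  obtain ⟨hnd, -, hitems⟩ := h
  have hbnd : best.keys.Nodup := hkeys ▸ hnd
  cases hg : groups.get? i with
  | none =>
    have hni : i ∉ groups.keys := (PySem.Dict.get?_eq_none_iff_not_mem_keys groups i).mp hg
    have : best.get? i = none :=
      (PySem.Dict.get?_eq_none_iff_not_mem_keys best i).mpr (hkeys ▸ hni)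
    simp [this]
  | some g =>
    have hm : (i, g) ∈ groups.items := PySem.Dict.mem_items_of_get?_eq_some groups hg
    have hb : (i, PySem.List.maxD g pvKf []) ∈ best.items := by
      rw [hitems]
      exact List.mem_map.mpr ⟨(i, g), hm, rfl⟩
    simp [PySem.Dict.get?_of_mem_items best hb hbnd]

lemma pv_maxD_of_max? {α : Type} (kf : α → Int) (g : List α) (m : α) (d : α)
    (h : PySem.List.max? g kf = some m) : PySem.List.maxD g kf d = m := by
  simp [PySem.List.maxD, h]

lemma pvStep_inv (best : PySem.Dict Int (List (String × Int)))
    (groups : PySem.Dict Int (List (List (String × Int))))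
    (h : pvInv best groups) (item : List (String × Int)) :
    pvInv (pvAStep best item) (pvBStep groups item) := by
  have hget := pv_get?_of_inv best groups h
  obtain ⟨hnd, hne, hitems⟩ := h
  unfold pvAStep pvBStep
  cases hid : (PySem.Dict.mk item).get? "id" with
  | none => exact ⟨hnd, hne, hitems⟩
  | some i =>
    simp only
    have hmod : groups.modify i [] (fun grp => grp ++ [item])
        = groups.insert i (groups.getD i [] ++ [item]) := rfl
    cases hg : groups.get? i with
    | none =>
      have hbg : best.get? i = none := by rw [hget i, hg]; rfl
      have hc : groups.contains i = false := by
        rw [PySem.Dict.contains_eq_isSome_get?, hg]; rfl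
      have hbc : best.contains i = false := by
        rw [PySem.Dict.contains_eq_isSome_get?, hbg]; rfl
      have hgd : groups.getD i [] = [] := by
        rw [PySem.Dict.getD_eq_get?_getD, hg]; rfl
      rw [hbg, hmod, hgd]
      refine ⟨?_, ?_, ?_⟩
      · rw [PySem.Dict.keys_insert_of_not_contains _ _ hc]
        have hni : i ∉ groups.keys := (PySem.Dict.get?_eq_none_iff_not_mem_keys groups i).mp hg
        simp only [List.nodup_append, List.nodup_singleton, true_and]
        refine ⟨hnd, ?_⟩
        intro a ha b hb hab
        rw [List.mem_singleton] at hb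
        exact hni ((hab.trans hb) ▸ ha)
      · intro p hp
        rcases (PySem.Dict.mem_items_insert _ _ _ _).mp hp with h1 | ⟨h2, -⟩
        · simp [h1]
        · exact hne p h2
      · rw [PySem.Dict.items_insert_of_not_contains _ _ hbc,
            PySem.Dict.items_insert_of_not_contains _ _ hc, List.map_append, hitems]
        rfl
    | some g =>
      have hgne : g ≠ [] := hne (i, g) (PySem.Dict.mem_items_of_get?_eq_some groups hg)
      have hbg : best.get? i = some (PySem.List.maxD g pvKf []) := by rw [hget i, hg]; rfl
      have hc : groups.contains i = true := by
        rw [PySem.Dict.contains_eq_isSome_get?, hg]; rfl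
      have hbc : best.contains i = true := by
        rw [PySem.Dict.contains_eq_isSome_get?, hbg]; rfl
      have hgd : groups.getD i [] = g := by
        rw [PySem.Dict.getD_eq_get?_getD, hg]; rfl
      obtain ⟨m, hms⟩ : ∃ m, PySem.List.max? g pvKf = some m :=
        Option.isSome_iff_exists.mp (pv_max?_isSome pvKf g hgne)
      have hmd : PySem.List.maxD g pvKf [] = m := pv_maxD_of_max? pvKf g m [] hms
      have hmax : PySem.List.maxD (g ++ [item]) pvKf []
          = if pvKf m < pvKf item then item else m := by
        rw [pv_maxD_of_max? pvKf (g ++ [item]) _ [] (pv_max?_append_singleton pvKf g item)]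
        rw [hms]
      have huniq : ∀ p ∈ groups.items, p.1 = i → p.2 = g := by
        intro p hp hpi
        have hp' : (i, p.2) ∈ groups.items := by
          have hpe : p = (i, p.2) := by rw [← hpi]
          rwa [hpe] at hp
        have hq := PySem.Dict.get?_of_mem_items groups hp' hnd
        rw [hg] at hq
        exact (Option.some_inj.mp hq).symm
      have hkeyne : (groups.insert i (g ++ [item])).keys.Nodup := by
        rw [PySem.Dict.keys_insert_of_contains _ _ hc]; exact hnd
      have hne' : ∀ p ∈ (groups.insert i (g ++ [item])).items, p.2 ≠ [] := by
        intro p hp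
        rcases (PySem.Dict.mem_items_insert _ _ _ _).mp hp with h1 | ⟨h2, -⟩
        · simp [h1]
        · exact hne p h2
      rw [hbg, hmod, hgd]
      simp only [gt_iff_lt]
      by_cases hlt : pvKf m < pvKf item
      · rw [if_pos (by rw [hmd]; exact hlt)]
        refine ⟨hkeyne, hne', ?_⟩
        rw [PySem.Dict.items_insert_of_contains _ _ hbc,
            PySem.Dict.items_insert_of_contains _ _ hc, hitems, List.map_map, List.map_map]
        apply List.map_congr_left
        intro p hp
        by_cases hpi : p.1 = i
        · have hb : (p.1 == i) = true := beq_iff_eq.mpr hpi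
          simp only [Function.comp, pvF, hb, if_pos, hmax]
          simp [hlt]
        · have hb : (p.1 == i) = false := beq_eq_false_iff_ne.mpr hpi
          simp [Function.comp, pvF, hb]
      · rw [if_neg (by rw [hmd]; exact hlt)]
        refine ⟨hkeyne, hne', ?_⟩
        rw [PySem.Dict.items_insert_of_contains _ _ hc, hitems, List.map_map]
        apply List.map_congr_left
        intro p hp
        by_cases hpi : p.1 = i
        · have hpg : p.2 = g := huniq p hp hpi
          have hb : (p.1 == i) = true := beq_iff_eq.mpr hpi
          simp only [Function.comp, pvF, hb, if_pos, hmax, if_neg hlt]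
          rw [← hpi, hpg, hmd]
        · have hb : (p.1 == i) = false := beq_eq_false_iff_ne.mpr hpi
          simp [Function.comp, pvF, hb]

lemma pvFold_inv (items : List (List (String × Int)))
    (best : PySem.Dict Int (List (String × Int)))
    (groups : PySem.Dict Int (List (List (String × Int)))) (h : pvInv best groups) :
    pvInv (items.foldl pvAStep best) (items.foldl pvBStep groups) := by
  induction items generalizing best groups with
  | nil => exact h
  | cons x t ih => exact ih _ _ (pvStep_inv _ _ h x)

-- ===== VERDICT (by name: the statement is the Claim_ definition above) =====
theorem merge_batches_spec : Claim_equal_merge_batches := by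
  intro batches _ _
  unfold Spec_merge_batches merge_batches merge_batches_alt
  have h0 : pvInv (PySem.Dict.empty : PySem.Dict Int (List (String × Int)))
      (PySem.Dict.empty : PySem.Dict Int (List (List (String × Int)))) :=
    ⟨by decide, by decide, by decide⟩
  have h := pvFold_inv batches.flatten _ _ h0
  obtain ⟨-, -, hitems⟩ := h
  rw [← List.foldl_flatten, ← List.foldl_flatten]
  simp only
  congr 1
  simp only [PySem.Dict.values, hitems, List.map_map]
  exact List.map_congr_left (fun p _ => rfl)
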